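-- pv_equiv track=rewrite | github.com/ISY-software/Daily-Coding-Problems | dbackspace/solution.py | srsh
-- ===== SOURCE A (Python) =====
-- def srsh(searched, container):
--     if len(searched) == 0 :
--         if (len(container)%2 == 0):
--             return True
--         return False
--     if len(container) == 0:
--         return False
--     if searched[0] == container[0]:
--         return srsh(searched[1:], container[1:])
--     if len(container) <= 2:
--         return False
--     return srsh(searched, container[2:])
-- ===== SOURCE B (Python) =====
-- def srsh(searched, container):
--     n, m = len(searched), len(container)
--     i = j = 0
--     while True:
--         if i >= n:
--             return (m - j) % 2 == 0
--         if j >= m: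
--             return False
--         if searched[i] == container[j]:
--             i += 1
--             j += 1
--         elif m - j <= 2:
--             return False
--         else:
--             j += 2
-- ===== Notes on version B (the rewrite author's own statement) =====
-- stated objective: faster
-- what changed: Replaced the recursion that re-slices both strings at every step with a single iterative two-pointer scan over indices, so no intermediate strings are built.
import Mathlib
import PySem

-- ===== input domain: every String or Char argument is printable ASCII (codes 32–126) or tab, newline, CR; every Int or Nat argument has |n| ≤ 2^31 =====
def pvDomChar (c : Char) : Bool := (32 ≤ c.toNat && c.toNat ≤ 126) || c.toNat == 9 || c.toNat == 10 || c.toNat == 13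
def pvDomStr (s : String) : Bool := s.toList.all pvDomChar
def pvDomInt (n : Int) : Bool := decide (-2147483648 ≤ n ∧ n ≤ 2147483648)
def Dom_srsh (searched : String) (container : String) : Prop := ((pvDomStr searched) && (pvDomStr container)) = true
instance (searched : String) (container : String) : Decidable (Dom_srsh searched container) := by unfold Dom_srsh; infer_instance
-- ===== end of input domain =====

-- B replaces A's recursion with per-step string slicing by an iterative two-pointer
-- index scan (faster: no intermediate strings); return values are identical.

-- ===== PORT A =====
-- A's recursion, step for step, over the character lists (s[1:], c[1:], c[2:] are drops)
def srshGo (s tt : List Char) : Bool :=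
  if s.length = 0 then (tt.length % 2 == 0)
  else if tt.length = 0 then false
  else if s.head? = tt.head? then srshGo (s.drop 1) (tt.drop 1)
  else if tt.length ≤ 2 then false
  else srshGo s (tt.drop 2)
termination_by s.length + tt.length
decreasing_by
  all_goals simp only [List.length_drop]; omega

def srsh (searched : String) (container : String) : Bool :=
  srshGo searched.toList container.toList

-- ===== PORT B =====
-- B's while-loop with the two index pointers i, j
def srshAltGo (s tt : List Char) (i j : Nat) : Bool :=
  if s.length ≤ i then ((tt.length - j) % 2 == 0)
  else if tt.length ≤ j then false
  else if s[i]? = tt[j]? then srshAltGo s tt (i + 1) (j + 1)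
  else if tt.length - j ≤ 2 then false
  else srshAltGo s tt i (j + 2)
termination_by (s.length - i) + (tt.length - j)
decreasing_by
  · omega
  · omega

def srsh_alt (searched : String) (container : String) : Bool :=
  srshAltGo searched.toList container.toList 0 0

-- ===== PRECONDITION & SPEC =====
def Spec_srsh (searched : String) (container : String) (out : Bool) : Prop := out = srsh_alt searched container
instance (searched : String) (container : String) (out : Bool) : Decidable (Spec_srsh searched container out) := by unfold Spec_srsh; infer_instance

-- ===== CLAIM (what is proved, stated in full; the proofs are below) =====
def Claim_equal_srsh : Prop := ∀ (searched : String) (container : String), Dom_srsh searched container → Spec_srsh searched container (srsh searched container)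

-- ===== LEMMAS AND PROOFS =====

-- the two-pointer loop at (i, j) computes A's recursion on the suffixes
theorem srshAltGo_eq_go (s tt : List Char) :
    ∀ (k i j : Nat), (s.length - i) + (tt.length - j) ≤ k →
      srshAltGo s tt i j = srshGo (s.drop i) (tt.drop j) := by
  intro k
  induction k with
  | zero =>
      intro i j hk
      have hi : s.length ≤ i := by omega
      rw [srshAltGo, srshGo]
      simp [hi, Nat.sub_eq_zero_of_le hi]
  | succ k ih =>
      intro i j hk
      rw [srshAltGo, srshGo]
      simp only [List.length_drop, List.head?_drop, List.drop_drop]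
      by_cases hi : s.length ≤ i
      · simp [hi, Nat.sub_eq_zero_of_le hi]
      · have hs : ¬ (s.length - i = 0) := by omega
        by_cases hj : tt.length ≤ j
        · simp [hi, hj, hs, Nat.sub_eq_zero_of_le hj]
        · have hc : ¬ (tt.length - j = 0) := by omega
          rw [if_neg hi, if_neg hj, if_neg hs, if_neg hc]
          by_cases he : s[i]? = tt[j]?
          · rw [if_pos he, if_pos he]
            have h := ih (i + 1) (j + 1) (by omega)
            simpa [List.drop_drop, Nat.add_comm] using h
          · rw [if_neg he, if_neg he]
            by_cases h2 : tt.length - j ≤ 2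
            · rw [if_pos h2, if_pos h2]
            · rw [if_neg h2, if_neg h2]
              have h := ih i (j + 2) (by omega)
              simpa [List.drop_drop, Nat.add_comm] using h

-- ===== VERDICT (by name: the statement is the Claim_ definition above) =====
theorem srsh_spec : Claim_equal_srsh := by
  intro searched container _
  unfold Spec_srsh srsh srsh_alt
  rw [srshAltGo_eq_go _ _ (searched.toList.length + container.toList.length) 0 0 (by omega)]
  simp
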